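-- pv_equiv track=rewrite | github.com/cocoxhuang/DyckTransformer | src/utils/transformer_analysis.py | tokens_to_path
-- ===== SOURCE A (Python) =====
-- def tokens_to_path(tokens):
--     """Convert tokens to path coordinates for plotting. North step is represented by a 1 and an East step is represented by a 0."""
--     x_coords = [0]
--     y_coords = [0]
--
--     for i, token in enumerate(tokens):
--         if token == 2:  # 0 in Dyck path (right step)
--             y_coords.append(y_coords[-1])
--             x_coords.append(x_coords[-1] + 1)
--         elif token == 3:  # 1 in Dyck path (up step)
--             y_coords.append(y_coords[-1] + 1)
--             x_coords.append(x_coords[-1])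
--         else:  # Other tokens (BOS, EOS, etc.)
--             # Skip these tokens entirely - don't add to path
--             continue
--
--     return x_coords, y_coords
-- ===== SOURCE B (Python) =====
-- import itertools
--
-- def tokens_to_path(tokens):
--     steps = [t for t in tokens if t == 2 or t == 3]
--     x_coords = list(itertools.accumulate((1 if t == 2 else 0 for t in steps), initial=0))
--     y_coords = list(itertools.accumulate((1 if t == 3 else 0 for t in steps), initial=0))
--     return x_coords, y_coords
-- ===== Notes on version B (the rewrite author's own statement) =====
-- stated objective: idiomatic
-- what changed: Replaces the single interleaved loop that mutates both coordinate lists via their last elements with a filter to step tokens followed by two independent itertools.accumulate prefix sums.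
import Mathlib
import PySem

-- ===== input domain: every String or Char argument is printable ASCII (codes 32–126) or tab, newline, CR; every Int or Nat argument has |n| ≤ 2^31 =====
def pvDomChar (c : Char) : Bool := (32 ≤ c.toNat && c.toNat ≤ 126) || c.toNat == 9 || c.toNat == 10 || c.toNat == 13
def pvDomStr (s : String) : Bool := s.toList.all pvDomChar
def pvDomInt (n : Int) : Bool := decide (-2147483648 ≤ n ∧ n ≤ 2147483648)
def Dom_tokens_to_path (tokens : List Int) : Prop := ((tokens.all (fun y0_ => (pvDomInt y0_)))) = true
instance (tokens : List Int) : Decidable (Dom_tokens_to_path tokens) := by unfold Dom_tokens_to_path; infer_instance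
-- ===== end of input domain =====

-- B replaces A's single interleaved loop (appending to both lists via their last elements)
-- with a filter to step tokens plus two independent prefix-sum (scanl) passes; idiomatic, same cost.


-- ===== PORT A =====
-- one loop step: append to both coordinate lists via their last element
-- (x_coords[-1] / y_coords[-1] ported as getLastD _ 0: exact, both lists start at [0] and only grow)
def tokensStepA (s : List Int × List Int) (token : Int) : List Int × List Int :=
  let (xc, yc) := s
  if token = 2 then (xc ++ [xc.getLastD 0 + 1], yc ++ [yc.getLastD 0])
  else if token = 3 then (xc ++ [xc.getLastD 0], yc ++ [yc.getLastD 0 + 1])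
  else (xc, yc)

def tokens_to_path (tokens : List Int) : List Int × List Int :=
  tokens.foldl tokensStepA ([0], [0])

-- ===== PORT B =====
-- itertools.accumulate(…, initial=0) over the filtered step tokens = List.scanl (+indicator) 0
def tokens_to_path_alt (tokens : List Int) : List Int × List Int :=
  let steps := tokens.filter (fun t => t == 2 || t == 3)
  (steps.scanl (fun a t => a + (if t = 2 then 1 else 0)) 0,
   steps.scanl (fun a t => a + (if t = 3 then 1 else 0)) 0)

-- ===== PRECONDITION & SPEC =====
def Spec_tokens_to_path (tokens : List Int) (out : List Int × List Int) : Prop := out = tokens_to_path_alt tokens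
instance (tokens : List Int) (out : List Int × List Int) : Decidable (Spec_tokens_to_path tokens out) := by unfold Spec_tokens_to_path; infer_instance

-- ===== CLAIM (what is proved, stated in full; the proofs are below) =====
def Claim_equal_tokens_to_path : Prop := ∀ (tokens : List Int), Dom_tokens_to_path tokens → Spec_tokens_to_path tokens (tokens_to_path tokens)

-- ===== LEMMAS AND PROOFS =====
theorem tokens_fold_general (tokens : List Int) :
    ∀ (xc yc : List Int) (a b : Int),
    tokens.foldl tokensStepA (xc ++ [a], yc ++ [b]) =
      (xc ++ (tokens.filter (fun t => t == 2 || t == 3)).scanl (fun a t => a + (if t = 2 then 1 else 0)) a,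
       yc ++ (tokens.filter (fun t => t == 2 || t == 3)).scanl (fun a t => a + (if t = 3 then 1 else 0)) b) := by
  induction tokens with
  | nil => intro xc yc a b; simp [List.scanl]
  | cons t ts ih =>
    intro xc yc a b
    by_cases h2 : t = 2
    · have := ih (xc ++ [a]) (yc ++ [b]) (a + 1) b
      simp [h2, tokensStepA, List.scanl] at this ⊢
      simpa using this
    · by_cases h3 : t = 3
      · have := ih (xc ++ [a]) (yc ++ [b]) a (b + 1)
        simp [h3, tokensStepA, List.scanl] at this ⊢
        simpa using this
      · simp [tokensStepA, h2, h3, List.foldl, ih]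

-- ===== VERDICT (by name: the statement is the Claim_ definition above) =====
theorem tokens_to_path_spec : Claim_equal_tokens_to_path := by
  intro tokens _
  unfold Spec_tokens_to_path tokens_to_path tokens_to_path_alt
  have := tokens_fold_general tokens [] [] 0 0
  simpa using this
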